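-- pv_equiv track=rewrite | github.com/dic-case-studies/casa6 | casa5/gcwrap/python/scripts/parallel/parallel_task_helper.py | listToCasaString
-- ===== SOURCE A (Python) =====
-- def listToCasaString(inputList):
--     """
--     This Method will take a list of integers and try to express them as a
--     compact set using the CASA notation.
--     """
--     if inputList is None or len(inputList) == 0:
--         return ''
--
--     def selectionString(rangeStart, rangeEnd):
--         if rangeStart == rangeEnd:
--             return str(rangeStart)
--         return "%d~%d" % (rangeStart, rangeEnd)
--
--     inputList.sort()
--     compactStrings = []
--     rangeStart = inputList[0]
--     lastValue = inputList[0]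
--     for val in inputList[1:]:
--         if val > lastValue + 1:
--             compactStrings.append(selectionString(rangeStart,lastValue))
--             rangeStart = val
--         lastValue = val
--     compactStrings.append(selectionString(rangeStart,lastValue))
--
--     return ','.join([a for a in compactStrings])
-- ===== SOURCE B (Python) =====
-- def listToCasaString(inputList):
--     """
--     Express a list of integers as a compact CASA selection string.
--     Set-based run detection (the classic hash-set 'consecutive sequences'
--     technique): build a set of the values, pick out the run starts (values v
--     with v-1 absent from the set), sort them, and extend each start upward by
--     membership tests to find its run's end; no scan over a sorted array to
--     detect gaps.
--     """
--     if inputList is None or len(inputList) == 0: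
--         return ''
--     inputList.sort()  # keep A's in-place sort side effect
--     values = set(inputList)
--     pieces = []
--     for a in sorted(v for v in values if v - 1 not in values):
--         b = a
--         while b + 1 in values:
--             b += 1
--         pieces.append(str(a) if a == b else '%d~%d' % (a, b))
--     return ','.join(pieces)
-- ===== Notes on version B (the rewrite author's own statement) =====
-- stated objective: alternative
-- what changed: Replaces A's sorted-array scan with per-element rangeStart/lastValue state by the hash-set consecutive-runs technique: build a set of the values, select run starts (v with v-1 absent from the set), sort the starts, and extend each start upward by membership tests to find its run end; gaps are never detected by comparing adjacent sorted elements.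
import Mathlib
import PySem

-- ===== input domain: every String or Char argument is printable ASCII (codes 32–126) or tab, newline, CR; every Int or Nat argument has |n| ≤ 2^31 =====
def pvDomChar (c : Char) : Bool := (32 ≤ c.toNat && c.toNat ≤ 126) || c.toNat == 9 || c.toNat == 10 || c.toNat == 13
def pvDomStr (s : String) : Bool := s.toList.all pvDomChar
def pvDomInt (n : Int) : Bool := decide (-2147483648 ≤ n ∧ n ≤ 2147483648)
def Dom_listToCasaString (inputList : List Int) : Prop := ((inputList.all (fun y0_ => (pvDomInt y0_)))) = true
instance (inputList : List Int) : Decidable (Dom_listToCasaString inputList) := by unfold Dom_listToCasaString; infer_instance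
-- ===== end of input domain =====

-- B replaces A's sorted-array scan with per-element rangeStart/lastValue state by the
-- hash-set consecutive-runs technique: build a set of the values, select the run starts
-- (v with v-1 absent), sort them, extend each start upward by membership tests
-- (alternative algorithm, same cost; both Pythons sort the argument in place — the
-- equivalence proved is about the return value).


-- ===== PORT A =====
-- inner helper selectionString
def pySelectionString (rangeStart rangeEnd : Int) : String :=
  if rangeStart = rangeEnd then PySem.Int.toStr rangeStart
  else PySem.Int.toStr rangeStart ++ "~" ++ PySem.Int.toStr rangeEnd

-- the body of A's for-loop, acting on the state (compactStrings, rangeStart, lastValue)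
def pyStepA (st : List String × Int × Int) (val : Int) : List String × Int × Int :=
  match st with
  | (compactStrings, rangeStart, lastValue) =>
    if val > lastValue + 1 then
      (compactStrings ++ [pySelectionString rangeStart lastValue], val, val)
    else
      (compactStrings, rangeStart, val)

def listToCasaString (inputList : List Int) : String :=
  if inputList.length = 0 then "" else
    -- inputList.sort() (in place; the return value is computed from the sorted list)
    match PySem.List.sorted inputList (fun x => x) with
    | [] => ""   -- unreachable: the list is nonempty
    | first :: rest =>
      match rest.foldl pyStepA ([], first, first) with
      | (compactStrings, rangeStart, lastValue) =>
        PySem.Str.join "," (compactStrings ++ [pySelectionString rangeStart lastValue])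

-- ===== PORT B =====
-- B's piece formatting: str(a) if a == b else '%d~%d' % (a, b)
def pyPiece (a b : Int) : String :=
  if a = b then PySem.Int.toStr a
  else PySem.Int.toStr a ++ "~" ++ PySem.Int.toStr b

-- termination measure fact for B's while loop (cited by extendRun's decreasing_by)
theorem pvFilterLtSucc (values : List Int) (b : Int) (h : (b + 1) ∈ values) :
    (values.filter (fun v => decide (b + 1 < v))).length
      < (values.filter (fun v => decide (b < v))).length := by
  induction values with
  | nil => simp at h
  | cons x t ih =>
    have hmono : (t.filter (fun v => decide (b + 1 < v))).length
        ≤ (t.filter (fun v => decide (b < v))).length := by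
      refine List.Sublist.length_le (List.monotone_filter_right t ?_)
      intro a ha
      simp only [decide_eq_true_eq] at ha ⊢; omega
    rcases List.mem_cons.mp h with hx | hx
    · subst hx
      have h1 : (decide (b + 1 < b + 1)) = false := by simp
      have h2 : (decide (b < b + 1)) = true := by simp
      simp
      omega
    · have := ih hx
      by_cases hbx : b + 1 < x
      · have g1 : (decide (b + 1 < x)) = true := by simp [hbx]
        have g2 : (decide (b < x)) = true := by simp; omega
        simp [g1, g2]
        omega
      · have g1 : (decide (b + 1 < x)) = false := by simp [hbx]
        by_cases hbx' : b < x
        · have g2 : (decide (b < x)) = true := by simp [hbx']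
          simp [g1, g2]
          omega
        · have g2 : (decide (b < x)) = false := by simp [hbx']
          simp [g1, g2]
          omega

-- B's while loop: 'b = a; while b + 1 in values: b += 1'
def extendRun (values : List Int) (b : Int) : Int :=
  if h : (b + 1) ∈ values then extendRun values (b + 1) else b
termination_by (values.filter (fun v => decide (b < v))).length
decreasing_by exact pvFilterLtSucc values b h

def listToCasaString_alt (inputList : List Int) : String :=
  if inputList.length = 0 then "" else
    -- inputList.sort() mutates in place; values = set(inputList) thus sees the sorted list
    let values : PySem.Set Int := PySem.Set.ofList (PySem.List.sorted inputList (fun x => x))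
    -- sorted(v for v in values if v - 1 not in values)
    let starts := PySem.List.sorted (values.filter (fun v => decide ((v - 1) ∉ values))) (fun x => x)
    PySem.Str.join "," (starts.map (fun a => pyPiece a (extendRun values a)))

-- ===== PRECONDITION & SPEC =====
def Spec_listToCasaString (inputList : List Int) (out : String) : Prop := out = listToCasaString_alt inputList
instance (inputList : List Int) (out : String) : Decidable (Spec_listToCasaString inputList out) := by unfold Spec_listToCasaString; infer_instance

-- ===== CLAIM (what is proved, stated in full; the proofs are below) =====
def Claim_equal_listToCasaString : Prop := ∀ (inputList : List Int), Dom_listToCasaString inputList → Spec_listToCasaString inputList (listToCasaString inputList)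

-- ===== LEMMAS AND PROOFS =====

-- ---- characterization of A: pieces of maximal runs of the sorted list ----

-- The list of pieces A's loop emits from state (rangeStart := rs, lastValue := lv) on the
-- remaining input l, including the final trailing piece.
def piecesA : List Int → Int → Int → List String
  | [], rs, lv => [pySelectionString rs lv]
  | v :: t, rs, lv =>
    if v > lv + 1 then pySelectionString rs lv :: piecesA t v v
    else piecesA t rs v

theorem foldl_pyStepA (l : List Int) (acc : List String) (rs lv : Int) :
    (l.foldl pyStepA (acc, rs, lv)).1 ++
      [pySelectionString (l.foldl pyStepA (acc, rs, lv)).2.1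
        (l.foldl pyStepA (acc, rs, lv)).2.2] = acc ++ piecesA l rs lv := by
  induction l generalizing acc rs lv with
  | nil => simp [piecesA]
  | cons v t ih =>
    by_cases h : v > lv + 1
    · rw [show piecesA (v :: t) rs lv = pySelectionString rs lv :: piecesA t v v by
            simp [piecesA, h]]
      simp only [List.foldl_cons, pyStepA, if_pos h]
      rw [ih]
      simp
    · rw [show piecesA (v :: t) rs lv = piecesA t rs v by simp [piecesA, h]]
      simp only [List.foldl_cons, pyStepA, if_neg h]
      exact ih acc rs v

-- the run extension on the explicit sorted list: last value of the maximal run, and suffix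
def takeRun (e : Int) : List Int → Int × List Int
  | [] => (e, [])
  | v :: t => if v ≤ e + 1 then takeRun v t else (e, v :: t)

theorem takeRun_snd_length_le (e : Int) (l : List Int) : (takeRun e l).2.length ≤ l.length := by
  induction l generalizing e with
  | nil => simp [takeRun]
  | cons v t ih =>
    simp only [takeRun]
    split
    · exact le_trans (ih v) (Nat.le_succ _)
    · exact Nat.le_refl _

-- run-at-a-time view of A's pieces (no sortedness needed: the break conditions complement)
def runPieces (rem : List Int) : List String :=
  match rem with
  | [] => []
  | x :: rest => pyPiece x (takeRun x rest).1 :: runPieces (takeRun x rest).2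
termination_by rem.length
decreasing_by
  have h1 := takeRun_snd_length_le x rest
  simp only [List.length_cons]
  omega

theorem pyPiece_eq (a b : Int) : pyPiece a b = pySelectionString a b := rfl

theorem piecesA_eq_runPieces (l : List Int) (rs lv : Int) :
    piecesA l rs lv = pyPiece rs (takeRun lv l).1 :: runPieces (takeRun lv l).2 := by
  induction l generalizing rs lv with
  | nil => simp [piecesA, takeRun, runPieces, pyPiece_eq]
  | cons v t ih =>
    by_cases h : v > lv + 1
    · have hnot : ¬ v ≤ lv + 1 := by omega
      rw [show piecesA (v :: t) rs lv = pySelectionString rs lv :: piecesA t v v by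
            simp [piecesA, h]]
      rw [show takeRun lv (v :: t) = (lv, v :: t) by simp [takeRun, hnot]]
      rw [show runPieces (v :: t) = pyPiece v (takeRun v t).1 :: runPieces (takeRun v t).2 by
            rw [runPieces]]
      rw [ih v v, pyPiece_eq]
      simp [pyPiece_eq]
    · have hle : v ≤ lv + 1 := by omega
      rw [show piecesA (v :: t) rs lv = piecesA t rs v by simp [piecesA, h]]
      rw [show takeRun lv (v :: t) = takeRun v t by simp [takeRun, hle]]
      exact ih rs v

-- ---- properties of takeRun on a sorted tail ----

theorem takeRun_spec (l : List Int) (e : Int) (hs : l.Pairwise (· ≤ ·))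
    (hge : ∀ v ∈ l, e ≤ v) :
    e ≤ (takeRun e l).1 ∧
    (∀ m : Int, e < m → m ≤ (takeRun e l).1 → m ∈ l) ∧
    (∀ v ∈ l, (e ≤ v ∧ v ≤ (takeRun e l).1) ∨ v ∈ (takeRun e l).2) ∧
    (∀ v ∈ (takeRun e l).2, (takeRun e l).1 + 1 < v) ∧
    (takeRun e l).2.Pairwise (· ≤ ·) ∧
    (∀ v ∈ (takeRun e l).2, v ∈ l) := by
  induction l generalizing e with
  | nil =>
    refine ⟨le_refl _, ?_, ?_, ?_, ?_, ?_⟩ <;> simp [takeRun]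
  | cons v t ih =>
    have hev : e ≤ v := hge v (List.mem_cons_self ..)
    have hvt : ∀ w ∈ t, v ≤ w := (List.pairwise_cons.mp hs).1
    have hst : t.Pairwise (· ≤ ·) := (List.pairwise_cons.mp hs).2
    by_cases h : v ≤ e + 1
    · have heq : takeRun e (v :: t) = takeRun v t := by simp [takeRun, h]
      obtain ⟨i1, i2, i3, i4, i5, i6⟩ := ih v hst hvt
      rw [heq]
      refine ⟨le_trans hev i1, ?_, ?_, i4, i5, fun w hw => List.mem_cons_of_mem _ (i6 w hw)⟩
      · intro m hm1 hm2
        by_cases hmv : v < m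
        · exact List.mem_cons_of_mem _ (i2 m hmv hm2)
        · have : m = v := by omega
          exact this ▸ List.mem_cons_self ..
      · intro w hw
        rcases List.mem_cons.mp hw with hwv | hwt
        · subst hwv; exact Or.inl ⟨hev, i1⟩
        · rcases i3 w hwt with ⟨h1, h2⟩ | h2
          · exact Or.inl ⟨le_trans hev h1, h2⟩
          · exact Or.inr h2
    · have heq : takeRun e (v :: t) = (e, v :: t) := by simp [takeRun, h]
      rw [heq]
      refine ⟨le_refl _, ?_, fun w hw => Or.inr hw, ?_, hs, fun w hw => hw⟩
      · intro m hm1 hm2; omega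
      · intro w hw
        rcases List.mem_cons.mp hw with hwv | hwt
        · omega
        · have := hvt w hwt; omega

-- ---- properties of extendRun ----

theorem extendRun_eq (V : List Int) (x e : Int) (hx : x ≤ e)
    (hin : ∀ m : Int, x < m → m ≤ e → m ∈ V) (hout : (e + 1) ∉ V) :
    extendRun V x = e := by
  obtain ⟨n, hn⟩ : ∃ n : Nat, (e - x).toNat = n := ⟨_, rfl⟩
  induction n generalizing x with
  | zero =>
    have : x = e := by omega
    subst this
    rw [extendRun, dif_neg hout]
  | succ k ih =>
    have hxe : x < e := by omega
    have hmem : (x + 1) ∈ V := hin (x + 1) (by omega) (by omega)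
    rw [extendRun, dif_pos hmem]
    exact ih (x + 1) (by omega) (fun m h1 h2 => hin m (by omega) h2) (by omega)

theorem extendRun_congr (V V' : List Int) (b : Int)
    (h : ∀ m : Int, b < m → (m ∈ V ↔ m ∈ V')) : extendRun V b = extendRun V' b := by
  suffices H : ∀ (n : Nat) (b : Int), (V.filter (fun v => decide (b < v))).length ≤ n →
      (∀ m : Int, b < m → (m ∈ V ↔ m ∈ V')) → extendRun V b = extendRun V' b from
    H _ b (le_refl _) h
  intro n
  induction n with
  | zero =>
    intro b hn h
    have hb : (b + 1) ∉ V := by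
      intro hmem
      have := pvFilterLtSucc V b hmem
      omega
    have hb' : (b + 1) ∉ V' := fun hm => hb ((h (b + 1) (by omega)).mpr hm)
    rw [extendRun, dif_neg hb]
    conv_rhs => rw [extendRun]
    rw [dif_neg hb']
  | succ k ih =>
    intro b hn h
    by_cases hb : (b + 1) ∈ V
    · have hb' : (b + 1) ∈ V' := (h (b + 1) (by omega)).mp hb
      rw [extendRun, dif_pos hb]
      conv_rhs => rw [extendRun]
      rw [dif_pos hb']
      have hlt := pvFilterLtSucc V b hb
      exact ih (b + 1) (by omega) (fun m h1 => h m (by omega))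
    · have hb' : (b + 1) ∉ V' := fun hm => hb ((h (b + 1) (by omega)).mpr hm)
      rw [extendRun, dif_neg hb]
      conv_rhs => rw [extendRun]
      rw [dif_neg hb']

-- sorted of a nodup list is strictly increasing
theorem sorted_nodup_pairwise_lt (l : List Int) (hnd : l.Nodup) :
    (PySem.List.sorted l (fun x => x) false).Pairwise (· < ·) := by
  have hle := PySem.List.sorted_pairwise (xs := l) (key := fun x => x)
  have hnd' : (PySem.List.sorted l (fun x => x) false).Nodup :=
    (PySem.List.sorted_perm (xs := l) (key := fun x => x) (rev := false)).nodup_iff.mpr hnd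
  have := List.Pairwise.and hle hnd'
  exact this.imp (fun h => lt_of_le_of_ne h.1 h.2)

-- ---- the core bridge: run pieces of a sorted list = set-based start/extend pieces ----

theorem runPieces_eq_setPieces (n : Nat) :
    ∀ (s V : List Int), s.length ≤ n → s.Pairwise (· ≤ ·) → V.Nodup →
      (∀ m : Int, m ∈ V ↔ m ∈ s) →
      runPieces s =
        (PySem.List.sorted (V.filter (fun v => decide ((v - 1) ∉ V))) (fun x => x)).map
          (fun a => pyPiece a (extendRun V a)) := by
  induction n with
  | zero =>
    intro s V hlen _ _ hmem
    have hs : s = [] := List.eq_nil_of_length_eq_zero (Nat.le_zero.mp hlen)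
    subst hs
    have hV : V = [] := List.eq_nil_iff_forall_not_mem.mpr (fun m hm => by simp at hmem; exact hmem m hm)
    subst hV
    rw [runPieces]
    simp [PySem.List.sorted]
  | succ n ih =>
    intro s V hlen hsort hnd hmem
    cases s with
    | nil =>
      have hV : V = [] := List.eq_nil_iff_forall_not_mem.mpr (fun m hm => by simp at hmem; exact hmem m hm)
      subst hV
      rw [runPieces]
      simp [PySem.List.sorted]
    | cons x rest =>
      have hxrest : ∀ w ∈ rest, x ≤ w := (List.pairwise_cons.mp hsort).1
      have hsrest : rest.Pairwise (· ≤ ·) := (List.pairwise_cons.mp hsort).2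
      obtain ⟨t1, t2, t3, t4, t5, t6⟩ := takeRun_spec rest x hsrest hxrest
      set e := (takeRun x rest).1 with he
      set rem := (takeRun x rest).2 with hrem
      -- e+1 is in neither the run nor the remainder
      have hsucc : (e + 1) ∉ (x :: rest) := by
        intro hm
        rcases List.mem_cons.mp hm with h | h
        · omega
        · rcases t3 _ h with ⟨_, h2⟩ | h2
          · omega
          · have := t4 _ h2; omega
      have hsuccV : (e + 1) ∉ V := fun hm => hsucc ((hmem _).mp hm)
      -- the restricted set for the remainder
      set V' := V.filter (fun v => decide (e + 1 < v)) with hV'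
      have hmem' : ∀ m : Int, m ∈ V' ↔ m ∈ rem := by
        intro m
        rw [hV', List.mem_filter]
        simp only [decide_eq_true_eq]
        constructor
        · rintro ⟨hmV, hlt⟩
          rcases List.mem_cons.mp ((hmem m).mp hmV) with h | h
          · omega
          · rcases t3 _ h with ⟨_, h2⟩ | h2
            · omega
            · exact h2
        · intro hmr
          exact ⟨(hmem m).mpr (List.mem_cons_of_mem _ (t6 _ hmr)), t4 _ hmr⟩
      have hnd' : V'.Nodup := hnd.filter _
      have hremlen : rem.length ≤ n := by
        rw [hrem]
        have := takeRun_snd_length_le x rest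
        simp only [List.length_cons] at hlen
        omega
      have ihrem := ih rem V' hremlen t5 hnd' hmem'
      -- x is in V and is a start
      have hxV : x ∈ V := (hmem x).mpr (List.mem_cons_self ..)
      have hxstart : (x - 1) ∉ V := by
        intro hm
        rcases List.mem_cons.mp ((hmem _).mp hm) with h | h
        · omega
        · have := hxrest _ h; omega
      -- membership of V' elements is > e+1
      have hV'gt : ∀ v ∈ V', e + 1 < v := by
        intro v hv
        exact (List.mem_filter.mp hv).2 |> decide_eq_true_eq.mp
      -- starts agree: P' v ↔ P v for v ∈ V', and x is the extra start
      have hstarts :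
          PySem.List.sorted (V.filter (fun v => decide ((v - 1) ∉ V))) (fun x => x) false
            = x :: PySem.List.sorted (V'.filter (fun v => decide ((v - 1) ∉ V'))) (fun x => x) false := by
        set T := PySem.List.sorted (V'.filter (fun v => decide ((v - 1) ∉ V'))) (fun x => x) false with hT
        have hTmem : ∀ m : Int, m ∈ T ↔ (m ∈ V' ∧ (m - 1) ∉ V') := by
          intro m
          rw [hT, PySem.List.mem_sorted, List.mem_filter]
          simp
        have hTgt : ∀ m ∈ T, e + 1 < m := fun m hm => hV'gt m (hTmem m |>.mp hm).1
        have hmemPP : ∀ m : Int, e + 1 < m → ((m - 1) ∈ V ↔ (m - 1) ∈ V') := by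
          intro m hm
          by_cases hme : m - 1 = e + 1
          · rw [hme]
            constructor
            · intro hcontr; exact absurd hcontr hsuccV
            · intro hcontr
              have := t4 _ ((hmem' (e + 1)).mp hcontr)
              omega
          · constructor
            · intro h
              rw [hV', List.mem_filter]
              refine ⟨h, by simp; omega⟩
            · intro h; exact (List.mem_filter.mp h).1
        -- target via sorted_eq_of_perm_of_pairwise_lt
        refine PySem.List.sorted_eq_of_perm_of_pairwise_lt _ _ (fun x => x) ?_ ?_
        · -- perm: (x :: T) ~ V.filter P
          have hnodupT : T.Nodup := by
            rw [hT]
            exact (PySem.List.sorted_perm ..).nodup_iff.mpr (hnd'.filter _)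
          have hndxT : (x :: T).Nodup := by
            refine List.nodup_cons.mpr ⟨?_, hnodupT⟩
            intro hx
            have := hTgt x hx
            omega
          have hndF : (V.filter (fun v => decide ((v - 1) ∉ V))).Nodup := hnd.filter _
          refine List.perm_of_nodup_nodup_toFinset_eq hndxT hndF ?_
          ext m
          simp only [List.mem_toFinset, List.mem_cons, List.mem_filter, decide_eq_true_eq]
          rw [hTmem m]
          constructor
          · rintro (hmx | ⟨h1, h2⟩)
            · subst hmx; exact ⟨hxV, hxstart⟩
            · have hgt := hV'gt m h1
              exact ⟨(List.mem_filter.mp h1).1, fun hm => h2 ((hmemPP m hgt).mp hm)⟩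
          · rintro ⟨h1, h2⟩
            by_cases hmx : m = x
            · exact Or.inl hmx
            · right
              rcases List.mem_cons.mp ((hmem m).mp h1) with h | h
              · exact absurd h hmx
              · rcases t3 _ h with ⟨ha, hb⟩ | hm2
                · -- x ≤ m ≤ e and m ≠ x: then m-1 ∈ s, contradicting h2
                  exfalso
                  have hxm : x < m := lt_of_le_of_ne ha (Ne.symm hmx)
                  apply h2
                  by_cases hmm : m - 1 = x
                  · exact (hmem (m-1)).mpr (by rw [hmm]; exact List.mem_cons_self ..)
                  · exact (hmem _).mpr (List.mem_cons_of_mem _ (t2 (m - 1) (by omega) (by omega)))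
                · have hgt := t4 _ hm2
                  have hmV' : m ∈ V' := (hmem' m).mpr hm2
                  exact ⟨hmV', fun hm' => h2 ((hmemPP m hgt).mpr hm')⟩
        · -- pairwise <
          refine List.pairwise_cons.mpr ⟨?_, ?_⟩
          · intro m hm
            have := hTgt m hm
            show x < m
            omega
          · exact sorted_nodup_pairwise_lt _ (hnd'.filter _)
      -- the mapped functions agree
      have hfx : extendRun V x = e :=
        extendRun_eq V x e t1
          (fun m h1 h2 => (hmem m).mpr (List.mem_cons_of_mem _ (t2 m h1 h2))) hsuccV
      have hmapT : ∀ a ∈ PySem.List.sorted (V'.filter (fun v => decide ((v - 1) ∉ V'))) (fun x => x) false,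
          extendRun V a = extendRun V' a := by
        intro a ha
        have haV' : a ∈ V' := (List.mem_filter.mp ((PySem.List.mem_sorted ..).mp ha)).1
        have hagt := hV'gt a haV'
        refine extendRun_congr V V' a ?_
        intro m hm
        rw [hV', List.mem_filter]
        simp only [decide_eq_true_eq]
        constructor
        · intro h; exact ⟨h, by omega⟩
        · exact fun h => h.1
      rw [runPieces, ← he, ← hrem, ihrem, hstarts]
      simp only [List.map_cons, hfx]
      congr 1
      exact List.map_congr_left (fun a ha => by rw [hmapT a ha])

-- ===== VERDICT (by name: the statement is the Claim_ definition above) =====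
theorem listToCasaString_spec : Claim_equal_listToCasaString := by
  intro inputList _
  unfold Spec_listToCasaString listToCasaString listToCasaString_alt
  by_cases hlen : inputList.length = 0
  · simp [hlen]
  · simp only [hlen, if_false]
    cases hs : PySem.List.sorted inputList (fun x => x) with
    | nil =>
      exfalso
      have hperm := PySem.List.sorted_perm (xs := inputList) (key := fun x => x) (rev := false)
      rw [hs] at hperm
      have := hperm.length_eq
      simp at this
      omega
    | cons first rest =>
      have hmain := runPieces_eq_setPieces (first :: rest).length (first :: rest)
        (PySem.Set.ofList (first :: rest)) (le_refl _)
        (hs ▸ PySem.List.sorted_pairwise inputList (fun x => x))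
        (PySem.Set.nodup_ofList _) (fun m => PySem.Set.mem_ofList ..)
      dsimp only
      rw [foldl_pyStepA rest [] first first]
      simp only [List.nil_append]
      rw [piecesA_eq_runPieces,
        ← show runPieces (first :: rest)
            = pyPiece first (takeRun first rest).1 :: runPieces (takeRun first rest).2 by
          rw [runPieces],
        hmain]
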